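-- pv_equiv track=rewrite | github.com/s-jinipark/pythonTest | COS_Lvl2/St3-1/D2/1차 1급 2_initial_code.py | solution
-- ===== SOURCE A (Python) =====
-- def func_a(string, length):
--     padZero = ""
--     #padSize = @@@
--     padSize = length - len(string)
--
--     for i in range(padSize):
--         padZero += "0"
--     return padZero + string
--
-- def solution(binaryA, binaryB):
--     max_length = max(len(binaryA), len(binaryB))
--     # binaryA = func_a(binaryA, max_length)
--     # binaryB = func_a(binaryB, max_length)
--     # 주의 @@@ 표시 같은 거 없어서 몰랐음
--     if max_length > len(binaryA) :
--         binaryA = func_a(binaryA, max_length)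
--     if max_length > len(binaryB) :
--         binaryB = func_a(binaryB, max_length)
--
--     hamming_distance = 0
--     for i in range(max_length):
--         #if @@@:
--         if binaryA[i]  != binaryB[i]:
--             hamming_distance += 1
--     return hamming_distance
-- ===== SOURCE B (Python) =====
-- def solution(binaryA, binaryB):
--     i = len(binaryA)
--     j = len(binaryB)
--     count = 0
--     while i > 0 or j > 0:
--         x = binaryA[i - 1] if i > 0 else '0'
--         y = binaryB[j - 1] if j > 0 else '0'
--         if x != y:
--             count += 1
--         i -= 1
--         j -= 1
--     return count
-- ===== Notes on version B (the rewrite author's own statement) =====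
-- stated objective: alternative
-- what changed: Instead of materializing a zero-padded copy of the shorter string and scanning both padded strings left-to-right by index, B runs a two-pointer right-to-left scan from both string ends with an implicit '0' whenever a pointer runs off its string, never building any padded string.
import Mathlib
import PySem

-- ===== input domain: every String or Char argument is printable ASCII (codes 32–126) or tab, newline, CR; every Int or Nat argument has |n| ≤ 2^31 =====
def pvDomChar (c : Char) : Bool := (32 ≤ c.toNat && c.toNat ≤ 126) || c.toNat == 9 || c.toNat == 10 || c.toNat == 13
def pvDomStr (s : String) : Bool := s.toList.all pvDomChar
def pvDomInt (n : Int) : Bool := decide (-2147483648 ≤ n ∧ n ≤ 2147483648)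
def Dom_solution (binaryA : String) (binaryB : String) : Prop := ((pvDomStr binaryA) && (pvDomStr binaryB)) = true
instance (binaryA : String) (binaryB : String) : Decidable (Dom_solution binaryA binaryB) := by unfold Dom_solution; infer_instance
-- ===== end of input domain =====

-- B replaces A's zero-padding + left-to-right index scan by a two-pointer right-to-left
-- scan from both string ends with an implicit '0' when a pointer runs off (objective: alternative).


-- ===== PORT A =====
-- func_a over the string's character list: padZero built by the range loop, then padZero + string
def func_a (string : List Char) (length : Int) : List Char :=
  let padSize := length - (string.length : Int)
  let padZero := (PySem.List.pyRange 0 padSize 1).foldl (fun acc _ => acc ++ ['0']) []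
  padZero ++ string

def solution (binaryA : String) (binaryB : String) : Int :=
  let a0 := binaryA.toList
  let b0 := binaryB.toList
  let max_length : Int := max (a0.length : Int) (b0.length : Int)
  let a := if max_length > (a0.length : Int) then func_a a0 max_length else a0
  let b := if max_length > (b0.length : Int) then func_a b0 max_length else b0
  -- indices 0 ≤ i < max_length are always in range after the padding, so pyGetD is exact here
  (PySem.List.pyRange 0 max_length 1).foldl
    (fun hd i => if PySem.List.pyGetD a i ' ' ≠ PySem.List.pyGetD b i ' ' then hd + 1 else hd) 0

-- ===== PORT B =====
-- the while loop: Python's i, j are only read when positive, so Nat counters with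
-- truncated subtraction are exact here, and the guarded index i-1 is always in range
def loopB (la lb : List Char) (i j : Nat) (count : Int) : Int :=
  if 0 < i ∨ 0 < j then
    let x := if 0 < i then la.getD (i - 1) ' ' else '0'
    let y := if 0 < j then lb.getD (j - 1) ' ' else '0'
    loopB la lb (i - 1) (j - 1) (if x ≠ y then count + 1 else count)
  else count
termination_by i + j
decreasing_by omega

def solution_alt (binaryA : String) (binaryB : String) : Int :=
  loopB binaryA.toList binaryB.toList binaryA.toList.length binaryB.toList.length 0

-- ===== PRECONDITION & SPEC =====
def Spec_solution (binaryA : String) (binaryB : String) (out : Int) : Prop := out = solution_alt binaryA binaryB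
instance (binaryA : String) (binaryB : String) (out : Int) : Decidable (Spec_solution binaryA binaryB out) := by unfold Spec_solution; infer_instance

-- ===== CLAIM (what is proved, stated in full; the proofs are below) =====
def Claim_equal_solution : Prop := ∀ (binaryA : String) (binaryB : String), Dom_solution binaryA binaryB → Spec_solution binaryA binaryB (solution binaryA binaryB)

-- ===== LEMMAS AND PROOFS =====

-- right-aligned zero-filled mismatch count on the REVERSED lists
def hammR : List Char → List Char → Int
  | [], [] => 0
  | x :: xs, [] => (if x ≠ '0' then 1 else 0) + hammR xs []
  | [], y :: ys => (if '0' ≠ y then 1 else 0) + hammR [] ys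
  | x :: xs, y :: ys => (if x ≠ y then 1 else 0) + hammR xs ys

-- the pad loop builds a block of '0's
theorem foldl_append_zero (l : List Int) (acc : List Char) :
    l.foldl (fun acc _ => acc ++ ['0']) acc = acc ++ List.replicate l.length '0' := by
  induction l generalizing acc with
  | nil => simp
  | cons x t ih =>
      simp [List.foldl_cons, ih, List.replicate_succ]

theorem func_a_eq (s : List Char) (n : Int) :
    func_a s n = List.replicate (n - (s.length : Int)).toNat '0' ++ s := by
  simp only [func_a, foldl_append_zero, PySem.List.length_pyRange_one, List.nil_append]
  congr 2
  omega

theorem countP_zip_replicate_right (xs : List Char) :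
    ((xs.zip (List.replicate xs.length '0')).countP (fun p => decide (p.1 ≠ p.2)))
      = xs.countP (fun c => decide (c ≠ '0')) := by
  induction xs with
  | nil => simp
  | cons x t ih =>
      simp only [List.length_cons, List.replicate_succ, List.zip_cons_cons, List.countP_cons, ih]

theorem countP_zip_replicate_left (xs : List Char) :
    (((List.replicate xs.length '0').zip xs).countP (fun p => decide (p.1 ≠ p.2)))
      = xs.countP (fun c => decide (c ≠ '0')) := by
  induction xs with
  | nil => simp
  | cons x t ih =>
      simp only [List.length_cons, List.replicate_succ, List.zip_cons_cons, List.countP_cons, ih]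
      by_cases h : x = '0' <;> simp [h, ne_comm]

theorem countP_zip_ne_comm (xs ys : List Char) :
    ((xs.zip ys).countP (fun p => decide (p.1 ≠ p.2)))
      = ((ys.zip xs).countP (fun p => decide (p.1 ≠ p.2))) := by
  induction xs generalizing ys with
  | nil => simp
  | cons x t ih =>
      cases ys with
      | nil => simp
      | cons y u =>
          simp only [List.zip_cons_cons, List.countP_cons, ih]
          by_cases h : x = y <;> simp [h, ne_comm]

-- A's index loop over two equal-length lists is the mismatch count of their zip
theorem hamming_fold (a b : List Char) (h : b.length = a.length) :
    (PySem.List.pyRange 0 (a.length : Int) 1).foldl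
      (fun hd i => if PySem.List.pyGetD a i ' ' ≠ PySem.List.pyGetD b i ' ' then hd + 1 else hd) (0 : Int)
    = ((a.zip b).countP (fun p => decide (p.1 ≠ p.2)) : Int) := by
  have hz : ((a.zip b).length : Int) = (a.length : Int) := by
    simp [List.length_zip, h]
  have hcongr :
      (PySem.List.pyRange 0 (a.length : Int) 1).foldl
        (fun hd i => if PySem.List.pyGetD a i ' ' ≠ PySem.List.pyGetD b i ' ' then hd + 1 else hd) (0 : Int)
      = (PySem.List.pyRange 0 ((a.zip b).length : Int) 1).foldl
        (fun hd i => if (PySem.List.pyGetD (a.zip b) i (' ', ' ')).1 ≠ (PySem.List.pyGetD (a.zip b) i (' ', ' ')).2 then hd + 1 else hd) (0 : Int) := by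
    rw [hz]
    refine PySem.List.foldl_congr_mem _ _ _ _ (fun acc x hx => ?_)
    rcases (PySem.List.mem_pyRange_one).1 hx with ⟨h0, h1⟩
    have hxa : x.toNat < a.length := by omega
    have hxb : x.toNat < b.length := by omega
    have hxz : x.toNat < (a.zip b).length := by simp [List.length_zip]; omega
    rw [PySem.List.pyGetD_eq_getElem a _ h0 (by exact_mod_cast h1),
        PySem.List.pyGetD_eq_getElem b _ h0 (by omega),
        PySem.List.pyGetD_eq_getElem (a.zip b) _ h0 (by omega)]
    simp [List.getElem_zip]
  rw [hcongr, PySem.List.foldl_pyRange_zero_pyGetD' (a.zip b) (' ', ' ')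
        (fun hd p => if p.1 ≠ p.2 then hd + 1 else hd) 0,
      PySem.List.foldl_ite_add_one]
  simp

-- A's padded-zip mismatch count splits into prefix-vs-'0' plus aligned tails
theorem zip_pad_count (xs ys : List Char) (d : Nat) (h : xs.length = d + ys.length) :
    ((xs.zip (List.replicate d '0' ++ ys)).countP (fun p => decide (p.1 ≠ p.2)) : Int)
      = ((xs.take d).countP (fun c => decide (c ≠ '0')) : Int)
        + (((xs.drop d).zip ys).countP (fun p => decide (p.1 ≠ p.2)) : Int) := by
  conv_lhs => rw [← List.take_append_drop d xs]
  rw [List.zip_append (by simp [List.length_replicate]; omega), List.countP_append,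
      show List.replicate d '0' = List.replicate (xs.take d).length '0' by
        rw [List.length_take]; congr 1; omega,
      countP_zip_replicate_right]
  push_cast
  ring

theorem zip_pad_count_left (xs ys : List Char) (d : Nat) (h : xs.length = d + ys.length) :
    (((List.replicate d '0' ++ ys).zip xs).countP (fun p => decide (p.1 ≠ p.2)) : Int)
      = ((xs.take d).countP (fun c => decide (c ≠ '0')) : Int)
        + (((xs.drop d).zip ys).countP (fun p => decide (p.1 ≠ p.2)) : Int) := by
  conv_lhs => rw [← List.take_append_drop d xs]
  rw [List.zip_append (by simp [List.length_replicate, List.length_take]; omega), List.countP_append,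
      show List.replicate d '0' = List.replicate (xs.take d).length '0' by
        rw [List.length_take]; congr 1; omega,
      countP_zip_replicate_left, countP_zip_ne_comm]
  push_cast
  ring

-- hammR against an exhausted side counts non-'0' characters
theorem hammR_nil_right (xs : List Char) :
    hammR xs [] = (xs.countP (fun c => decide (c ≠ '0')) : Int) := by
  induction xs with
  | nil => simp [hammR]
  | cons x t ih =>
      rw [hammR, ih, List.countP_cons]
      by_cases h : x = '0'
      · simp [h]
      · simp [h]
        push_cast
        ring

theorem hammR_nil_left (ys : List Char) :
    hammR [] ys = (ys.countP (fun c => decide (c ≠ '0')) : Int) := by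
  induction ys with
  | nil => simp [hammR]
  | cons y t ih =>
      rw [hammR, ih, List.countP_cons]
      by_cases h : y = '0'
      · subst h
        simp
      · have h' : ('0' : Char) ≠ y := fun he => h he.symm
        rw [if_pos h']
        simp [h]
        push_cast
        ring

-- hammR splits into the aligned part plus the longer side's overhang counted against '0'
theorem hammR_split_left (ys : List Char) : ∀ (xs : List Char), ys.length ≤ xs.length →
    hammR xs ys = ((xs.take ys.length).zip ys).countP (fun p => decide (p.1 ≠ p.2))
      + ((xs.drop ys.length).countP (fun c => decide (c ≠ '0')) : Int) := by
  induction ys with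
  | nil =>
      intro xs _
      simp [hammR_nil_right]
  | cons y t ih =>
      intro xs hlen
      cases xs with
      | nil => simp at hlen
      | cons x u =>
          rw [hammR, ih u (by simpa using hlen)]
          simp only [List.length_cons, List.take_succ_cons, List.zip_cons_cons,
            List.countP_cons, List.drop_succ_cons]
          by_cases h : x = y
          · simp [h]
          · simp [h]
            push_cast
            ring

theorem hammR_split_right (xs : List Char) : ∀ (ys : List Char), xs.length ≤ ys.length →
    hammR xs ys = (xs.zip (ys.take xs.length)).countP (fun p => decide (p.1 ≠ p.2))
      + ((ys.drop xs.length).countP (fun c => decide (c ≠ '0')) : Int) := by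
  induction xs with
  | nil =>
      intro ys _
      simp [hammR_nil_left]
  | cons x u ih =>
      intro ys hlen
      cases ys with
      | nil => simp at hlen
      | cons y t =>
          rw [hammR, ih t (by simpa using hlen)]
          simp only [List.length_cons, List.take_succ_cons, List.zip_cons_cons,
            List.countP_cons, List.drop_succ_cons]
          by_cases h : x = y
          · simp [h]
          · simp [h]
            push_cast
            ring

-- zip commutes with reverse on equal lengths
theorem zip_reverse (xs : List Char) : ∀ (ys : List Char), xs.length = ys.length →
    xs.reverse.zip ys.reverse = (xs.zip ys).reverse := by
  induction xs with
  | nil => intro ys h; simp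
  | cons x u ih =>
      intro ys h
      cases ys with
      | nil => simp at h
      | cons y t =>
          have hl : u.length = t.length := by simpa using h
          simp only [List.reverse_cons, List.zip_cons_cons]
          rw [List.zip_append (by simp [hl]), ih t hl]
          simp

-- B's loop computes hammR of the reversed processed prefixes
theorem loopB_eq (la lb : List Char) : ∀ (i j : Nat) (c : Int),
    i ≤ la.length → j ≤ lb.length →
    loopB la lb i j c = c + hammR ((la.take i).reverse) ((lb.take j).reverse) := by
  intro i j
  induction hn : i + j using Nat.strong_induction_on generalizing i j with
  | _ n ih =>
  intro c hi hj
  rw [loopB]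
  by_cases hc : 0 < i ∨ 0 < j
  · rw [if_pos hc]
    have hrec := ih ((i-1)+(j-1)) (by omega) (i-1) (j-1) rfl
      (if (if 0 < i then la.getD (i - 1) ' ' else '0') ≠ (if 0 < j then lb.getD (j - 1) ' ' else '0')
        then c + 1 else c) (by omega) (by omega)
    rw [hrec]
    have hx : ∀ (l : List Char) (k : Nat), 0 < k → k ≤ l.length →
        (l.take k).reverse = l.getD (k-1) ' ' :: (l.take (k-1)).reverse := by
      intro l k hk hkl
      have hlt : k - 1 < l.length := by omega
      have h1 : l.take k = l.take (k-1) ++ [l[k-1]] := by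
        conv_lhs => rw [show k = (k-1)+1 by omega]
        rw [List.take_succ, List.getElem?_eq_getElem hlt]
        rfl
      rw [h1, List.getD_eq_getElem l ' ' hlt]
      simp
    have h00 : ¬ (0:Nat) < 0 := by omega
    rcases Nat.lt_or_ge 0 i with hi0 | hi0 <;> rcases Nat.lt_or_ge 0 j with hj0 | hj0
    · rw [hx la i hi0 hi, hx lb j hj0 hj, if_pos hi0, if_pos hj0]
      simp only [hammR]
      split_ifs <;> ring
    · have hj' : j = 0 := by omega
      subst hj'
      rw [hx la i hi0 hi, if_pos hi0, if_neg h00]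
      simp only [Nat.zero_sub, List.take_zero, List.reverse_nil, hammR]
      split_ifs <;> ring
    · have hi' : i = 0 := by omega
      subst hi'
      rw [hx lb j hj0 hj, if_pos hj0, if_neg h00]
      simp only [Nat.zero_sub, List.take_zero, List.reverse_nil, hammR]
      split_ifs <;> ring
    · omega
  · rw [if_neg hc]
    have hij : i = 0 ∧ j = 0 := by omega
    simp [hij.1, hij.2, hammR]

-- ===== VERDICT (by name: the statement is the Claim_ definition above) =====
theorem solution_spec : Claim_equal_solution := by
  intro binaryA binaryB _
  unfold Spec_solution solution solution_alt
  set la := binaryA.toList with hla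
  set lb := binaryB.toList with hlb
  dsimp only
  rw [loopB_eq la lb la.length lb.length 0 (le_refl _) (le_refl _),
      List.take_length, List.take_length, zero_add]
  by_cases hge : lb.length ≤ la.length
  · -- A is at least as long: only B is padded
    have hmax : max (la.length : Int) (lb.length : Int) = (la.length : Int) := by
      simp; omega
    have hA : (if max (la.length : Int) (lb.length : Int) > (la.length : Int)
        then func_a la (max (la.length : Int) (lb.length : Int)) else la) = la := by
      rw [hmax]; simp
    have hBpad : (if max (la.length : Int) (lb.length : Int) > (lb.length : Int)
        then func_a lb (max (la.length : Int) (lb.length : Int)) else lb)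
        = List.replicate (la.length - lb.length) '0' ++ lb := by
      rw [hmax]
      by_cases hlt : (lb.length : Int) < (la.length : Int)
      · rw [if_pos hlt, func_a_eq]
        congr 2
        omega
      · have : la.length = lb.length := by omega
        rw [if_neg (by omega)]
        simp [this]
    rw [hA, hBpad, hmax,
        hamming_fold la _ (by simp only [List.length_append, List.length_replicate]; omega),
        zip_pad_count la lb (la.length - lb.length) (by omega),
        hammR_split_left lb.reverse la.reverse (by simp only [List.length_reverse]; omega)]
    simp only [List.length_reverse]
    rw [List.take_reverse, List.drop_reverse,
        zip_reverse _ _ (by simp only [List.length_drop]; omega)]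
    simp only [List.countP_reverse]
    push_cast
    ring
  · -- B is longer: only A is padded
    have hmax : max (la.length : Int) (lb.length : Int) = (lb.length : Int) := by
      simp; omega
    have hB : (if max (la.length : Int) (lb.length : Int) > (lb.length : Int)
        then func_a lb (max (la.length : Int) (lb.length : Int)) else lb) = lb := by
      rw [hmax]; simp
    have hApad : (if max (la.length : Int) (lb.length : Int) > (la.length : Int)
        then func_a la (max (la.length : Int) (lb.length : Int)) else la)
        = List.replicate (lb.length - la.length) '0' ++ la := by
      rw [hmax, if_pos (by omega), func_a_eq]
      congr 2
      omega
    rw [hB, hApad, hmax,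
        show ((lb.length : Int)) = ((List.replicate (lb.length - la.length) '0' ++ la).length : Int) by
          simp only [List.length_append, List.length_replicate]; push_cast; omega,
        hamming_fold _ lb (by simp only [List.length_append, List.length_replicate]; omega),
        zip_pad_count_left lb la (lb.length - la.length) (by omega),
        hammR_split_right la.reverse lb.reverse (by simp only [List.length_reverse]; omega)]
    simp only [List.length_reverse]
    rw [List.take_reverse, List.drop_reverse,
        zip_reverse _ _ (by simp only [List.length_drop]; omega)]
    simp only [List.countP_reverse]
    rw [countP_zip_ne_comm]
    push_cast
    ring
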